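-- pv_equiv track=rewrite | github.com/MiPitera/CDC | fastCDC.py | create_mask
-- ===== SOURCE A (Python) =====
-- def create_mask(length):
--     #padded mask
--
--     pattern_length = 64 // length
--
--     pattern = 1<<(pattern_length -1)
--
--     mask = 0
--     for i in range(length):
--         mask |= pattern << (i*pattern_length)
--
--     mask = mask & 0xFFFFFFFFFFFFFFFF  # Ensure mask is within 64 bits
--     return mask
-- ===== SOURCE B (Python) =====
-- def create_mask(length):
--     # Iterate over the 64 bit positions: bit j is set exactly when j is the top
--     # bit of one of the first `length` groups of width 64//length.
--     step = 64 // length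
--     return sum(1 << j for j in range(64) if j % step == step - 1 and j < step * length)
-- ===== Notes on version B (the rewrite author's own statement) =====
-- stated objective: alternative
-- what changed: Instead of A's per-group loop OR-ing a shifted pattern for each of the `length` groups, B scans the 64 bit positions once and sets bit j exactly when j is the top bit of one of the first `length` groups (j % step == step-1 and j < step*length), summing the powers of two.
import Mathlib
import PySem

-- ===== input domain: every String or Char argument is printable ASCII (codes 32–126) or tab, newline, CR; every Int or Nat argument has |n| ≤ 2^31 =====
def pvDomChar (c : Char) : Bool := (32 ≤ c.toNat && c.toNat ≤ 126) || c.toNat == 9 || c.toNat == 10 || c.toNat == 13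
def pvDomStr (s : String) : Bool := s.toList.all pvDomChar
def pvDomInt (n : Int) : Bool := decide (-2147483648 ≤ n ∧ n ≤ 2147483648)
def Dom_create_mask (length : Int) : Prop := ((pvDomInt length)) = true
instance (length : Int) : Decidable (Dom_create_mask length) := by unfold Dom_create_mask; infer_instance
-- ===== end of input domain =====

-- ===== PORT A =====
-- One honest line: B scans the 64 bit positions with a congruence test instead of OR-ing
-- a shifted pattern per group (alternative decomposition, same cost).
-- Port of A: '//' via PySem.Int.floordiv, '1<<k' as <<< on toNat (k ≥ 0 under Pre_), the loop a foldl over range(length).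
def create_mask (length : Int) : Int :=
  let pattern_length : Int := PySem.Int.floordiv 64 length
  let pattern : Int := (1 : Int) <<< (pattern_length - 1).toNat
  let mask : Int := (PySem.List.pyRange 0 length 1).foldl
    (fun mask i => PySem.Int.bor mask (pattern <<< (i * pattern_length).toNat)) 0
  PySem.Int.band mask 0xFFFFFFFFFFFFFFFF

-- ===== PORT B =====
-- Port of B: sum over range(64) adding 1<<j when j % step == step-1 and j < step*length.
def create_mask_alt (length : Int) : Int :=
  let step : Int := PySem.Int.floordiv 64 length
  (PySem.List.pyRange 0 64 1).foldl
    (fun acc j =>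
      if PySem.Int.mod j step = step - 1 ∧ j < step * length then acc + ((1 : Int) <<< j.toNat)
      else acc) 0

-- ===== PRECONDITION & SPEC =====
-- Pre_ excludes exactly the inputs where A raises: length = 0 (ZeroDivisionError) and
-- length < 0 or length > 64 (negative shift count, ValueError).
def Pre_create_mask (length : Int) : Prop := 1 ≤ length ∧ length ≤ 64
instance (length : Int) : Decidable (Pre_create_mask length) := by unfold Pre_create_mask; infer_instance
def pvWitness_create_mask : Int := 8
def Spec_create_mask (length : Int) (out : Int) : Prop := out = create_mask_alt length
instance (length : Int) (out : Int) : Decidable (Spec_create_mask length out) := by unfold Spec_create_mask; infer_instance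

-- ===== CLAIM (what is proved, stated in full; the proofs are below) =====
def Claim_equal_create_mask : Prop := ∀ (length : Int), Dom_create_mask length → Pre_create_mask length → Spec_create_mask length (create_mask length)

-- ===== LEMMAS AND PROOFS =====

-- ===== VERDICT (by name: the statement is the Claim_ definition above) =====
set_option maxRecDepth 16384 in
theorem create_mask_spec : Claim_equal_create_mask := by
  intro length _ hpre
  obtain ⟨h1, h2⟩ := hpre
  unfold Spec_create_mask
  interval_cases length <;> decide
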